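-- pv_equiv track=rewrite | github.com/yaronlev9/AI_ex2_2048 | multi_agents.py | get_adjacencies
-- ===== SOURCE A (Python) =====
-- def get_adjacencies(board):
--     """
--     gets the number of all the foldable tiles on the board.
--     """
--     counter = 0
--     prev_num = None
--     for row in board:
--         for cell in row:
--             if cell != 0 and prev_num is None:
--                 prev_num = cell
--                 continue
--             if cell != 0:
--                 if cell == prev_num:
--                     counter += 1
--                     prev_num = None
--                 else:
--                     prev_num = cell
--         prev_num = None
--     return counter
-- ===== SOURCE B (Python) =====
-- from itertools import groupby
--
--
-- def get_adjacencies(board):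
--     """
--     gets the number of all the foldable tiles on the board.
--     """
--     total = 0
--     for row in board:
--         for _key, run in groupby(cell for cell in row if cell != 0):
--             total += sum(1 for _ in run) // 2
--     return total
-- ===== Notes on version B (the rewrite author's own statement) =====
-- stated objective: idiomatic
-- what changed: Replaces the cross-cell pending-value state machine with a per-row filter of zeros followed by itertools.groupby, adding len(run)//2 for each maximal run of equal values.
import Mathlib
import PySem

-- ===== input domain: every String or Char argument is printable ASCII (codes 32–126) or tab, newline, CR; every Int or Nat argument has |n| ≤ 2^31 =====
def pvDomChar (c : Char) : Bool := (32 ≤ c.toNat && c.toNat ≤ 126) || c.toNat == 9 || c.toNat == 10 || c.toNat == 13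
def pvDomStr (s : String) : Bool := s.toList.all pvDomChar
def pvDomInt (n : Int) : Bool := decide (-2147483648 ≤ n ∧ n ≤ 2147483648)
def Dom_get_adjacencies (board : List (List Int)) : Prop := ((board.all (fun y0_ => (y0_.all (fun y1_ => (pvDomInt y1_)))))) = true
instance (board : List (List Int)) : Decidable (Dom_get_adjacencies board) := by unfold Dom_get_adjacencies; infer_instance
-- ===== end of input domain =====

-- B replaces A's cross-cell pending-value state machine by a per-row zero-filter
-- followed by grouping into maximal runs of equal values, adding length/2 per run (idiomatic).


-- ===== PORT A =====
-- the body of A's inner loop: (counter, prev_num), branch order as in the Python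
def aStep (s : Int × Option Int) (cell : Int) : Int × Option Int :=
  if cell ≠ 0 ∧ s.2 = none then (s.1, some cell)
  else if cell ≠ 0 then
    if some cell = s.2 then (s.1 + 1, none)
    else (s.1, some cell)
  else s

def get_adjacencies (board : List (List Int)) : Int :=
  (board.foldl (fun st row => ((row.foldl aStep st).1, (none : Option Int)))
    ((0 : Int), (none : Option Int))).1

-- ===== PORT B =====
-- per row: filter out zeros, group into maximal runs of equal values, add length/2 per run
def get_adjacencies_alt (board : List (List Int)) : Int :=
  board.foldl (fun total row =>
    ((row.filter (fun cell => cell ≠ 0)).splitBy (fun a b => a == b)).foldl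
      (fun t run => t + ((run.length / 2 : Nat) : Int)) total) 0

-- ===== PRECONDITION & SPEC =====
def Spec_get_adjacencies (board : List (List Int)) (out : Int) : Prop := out = get_adjacencies_alt board
instance (board : List (List Int)) (out : Int) : Decidable (Spec_get_adjacencies board out) := by unfold Spec_get_adjacencies; infer_instance

-- ===== CLAIM (what is proved, stated in full; the proofs are below) =====
def Claim_equal_get_adjacencies : Prop := ∀ (board : List (List Int)), Dom_get_adjacencies board → Spec_get_adjacencies board (get_adjacencies board)

-- ===== LEMMAS AND PROOFS =====

-- reference greedy pair count on a zero-free list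
def pairs : List Int → Int
  | [] => 0
  | [_] => 0
  | x :: y :: xs => if x = y then 1 + pairs xs else pairs (y :: xs)

def optL : Option Int → List Int
  | none => []
  | some p => [p]

-- A's inner loop computes `pairs` of the pending value followed by the filtered row
theorem aStep_foldl (xs : List Int) : ∀ (c : Int) (prev : Option Int),
    (xs.foldl aStep (c, prev)).1 = c + pairs (optL prev ++ xs.filter (fun cell => cell ≠ 0)) := by
  induction xs with
  | nil =>
    intro c prev
    cases prev <;> simp [pairs, optL]
  | cons x xs ih =>
    intro c prev
    by_cases hx : x = 0
    · subst hx
      cases prev <;> simp [aStep, ih, optL]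
    · cases prev with
      | none =>
        simp [aStep, hx, ih, optL]
      | some p =>
        by_cases hp : x = p
        · subst hp
          simp only [List.foldl_cons, aStep]
          simp [ih, optL, pairs, hx]
          ring
        · simp only [List.foldl_cons, aStep]
          have : ¬ some x = some p := by simp [hp]
          simp [this, hx, ih, optL, pairs, Ne.symm hp]

-- a chain of boolean equality is constant
theorem isChain_beq_const (g : List Int) (hg : g.IsChain (fun x y => x == y)) :
    ∀ v ∈ g.head?, g = List.replicate g.length v := by
  induction g with
  | nil => simp
  | cons x g ih =>
    intro v hv
    simp only [List.head?_cons, Option.mem_def, Option.some.injEq] at hv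
    subst hv
    rw [List.isChain_cons] at hg
    cases g with
    | nil => simp
    | cons y g =>
      have hxy : x = y := by
        have := hg.1 y (by simp)
        simpa using this
      subst hxy
      have := ih hg.2 x (by simp)
      simpa [List.replicate] using this

-- greedy pairs of a constant run followed by a non-matching rest
theorem pairs_replicate_append (n : Nat) (v : Int) (rest : List Int)
    (h : ∀ w ∈ rest.head?, w ≠ v) :
    pairs (List.replicate n v ++ rest) = ((n / 2 : Nat) : Int) + pairs rest := by
  induction n using Nat.strong_induction_on with
  | _ n ih =>
    match n with
    | 0 => simp
    | 1 =>
      cases rest with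
      | nil => simp [pairs]
      | cons w rs =>
        have hw : w ≠ v := h w (by simp)
        simp [pairs, Ne.symm hw]
    | (m + 2) =>
      have : List.replicate (m + 2) v ++ rest = v :: v :: (List.replicate m v ++ rest) := by
        simp [List.replicate_succ]
      rw [this]
      have e1 : pairs (v :: v :: (List.replicate m v ++ rest))
          = 1 + pairs (List.replicate m v ++ rest) := by simp [pairs]
      rw [e1, ih m (by omega)]
      have e2 : (m + 2) / 2 = m / 2 + 1 := by omega
      rw [e2]
      push_cast
      ring

-- sum of length/2 over a run decomposition equals the greedy pair count of the flattening
theorem pairs_runs (L : List (List Int)) (hn : [] ∉ L)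
    (hc : ∀ g ∈ L, g.IsChain (fun x y => x == y))
    (hb : L.IsChain (fun a b => ∃ ha hb, (a.getLast ha == b.head hb) = false)) :
    pairs L.flatten = (L.map (fun g => ((g.length / 2 : Nat) : Int))).sum := by
  induction L with
  | nil => simp [pairs]
  | cons g L ih =>
    have hgne : g ≠ [] := by intro h; exact hn (by simp [h])
    obtain ⟨v, hrep⟩ : ∃ v, g = List.replicate g.length v := by
      cases g with
      | nil => exact absurd rfl hgne
      | cons x g' => exact ⟨x, isChain_beq_const _ (hc _ (by simp)) x (by simp)⟩
    rw [List.isChain_cons] at hb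
    have hrest : ∀ w ∈ L.flatten.head?, w ≠ v := by
      intro w hw
      cases L with
      | nil => simp at hw
      | cons g1 L' =>
        have hg1ne : g1 ≠ [] := by intro h; exact hn (by simp [h])
        obtain ⟨a, g1', rfl⟩ := List.exists_cons_of_ne_nil hg1ne
        have hwa : a = w := by simpa using hw
        obtain ⟨ha, hb', hf⟩ := hb.1 (a :: g1') (by simp)
        obtain ⟨x, hx⟩ : ∃ x, g.getLast ha = x := ⟨_, rfl⟩
        have hm : x ∈ g := hx ▸ List.getLast_mem ha
        rw [hrep] at hm
        have hlast : x = v := List.eq_of_mem_replicate hm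
        rw [hx, hlast] at hf
        simp only [List.head_cons] at hf
        have hva : v ≠ a := by simpa using hf
        intro hwv
        exact hva (hwa.trans hwv).symm
    rw [List.flatten_cons, List.map_cons, List.sum_cons]
    have := pairs_replicate_append g.length v L.flatten hrest
    rw [← hrep] at this
    rw [this, ih (fun h => hn (by simp [h])) (fun g' hg' => hc _ (by simp [hg'])) hb.2]

-- greedy pairs via splitBy into maximal equal runs
theorem pairs_splitBy (xs : List Int) :
    pairs xs = ((xs.splitBy (fun a b => a == b)).map (fun g => ((g.length / 2 : Nat) : Int))).sum := by
  obtain ⟨h1, h2, h3, h4⟩ := (List.splitBy_eq_iff (m := xs) (r := fun a b => a == b)).mp rfl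
  calc pairs xs = pairs (xs.splitBy (fun a b => a == b)).flatten := by rw [← h1]
    _ = _ := pairs_runs _ h2 h3 h4

-- B's inner loop as a sum
theorem foldl_add_groups (L : List (List Int)) : ∀ (t : Int),
    L.foldl (fun t run => t + ((run.length / 2 : Nat) : Int)) t
      = t + (L.map (fun g => ((g.length / 2 : Nat) : Int))).sum := by
  induction L with
  | nil => simp
  | cons g L ih =>
    intro t
    rw [List.foldl_cons, ih, List.map_cons, List.sum_cons]
    ring

-- A's outer loop as a sum over rows
theorem a_fold (bs : List (List Int)) : ∀ (c : Int),
    (bs.foldl (fun st row => ((row.foldl aStep st).1, (none : Option Int))) (c, none)).1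
      = c + (bs.map (fun row => pairs (row.filter (fun cell => cell ≠ 0)))).sum := by
  induction bs with
  | nil => simp
  | cons row bs ih =>
    intro c
    simp only [List.foldl_cons, List.map_cons, List.sum_cons]
    rw [ih, aStep_foldl]
    simp [optL]
    ring

-- B's outer loop as the same sum over rows
theorem b_fold (bs : List (List Int)) : ∀ (t : Int),
    bs.foldl (fun total row =>
        ((row.filter (fun cell => cell ≠ 0)).splitBy (fun a b => a == b)).foldl
          (fun t run => t + ((run.length / 2 : Nat) : Int)) total) t
      = t + (bs.map (fun row => pairs (row.filter (fun cell => cell ≠ 0)))).sum := by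
  induction bs with
  | nil => simp
  | cons row bs ih =>
    intro t
    simp only [List.foldl_cons, List.map_cons, List.sum_cons]
    rw [ih, foldl_add_groups, ← pairs_splitBy]
    ring

-- ===== VERDICT (by name: the statement is the Claim_ definition above) =====
theorem get_adjacencies_spec : Claim_equal_get_adjacencies := by
  intro board _
  unfold Spec_get_adjacencies get_adjacencies get_adjacencies_alt
  rw [a_fold, b_fold]
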